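-- pv_equiv track=rewrite | github.com/jasvinder-builder/family-assistant | services/scene_service.py | _match_label_to_query
-- ===== SOURCE A (Python) =====
-- def _match_label_to_query(label: str, queries: list[str]) -> int:
--     """Return the index of the best-matching query for a GDINO label string."""
--     label_l = label.lower().strip()
--     for i, q in enumerate(queries):
--         if q.lower().strip() == label_l:
--             return i
--     for i, q in enumerate(queries):
--         ql = q.lower().strip()
--         if label_l in ql or ql in label_l:
--             return i
--     return 0
-- ===== SOURCE B (Python) =====
-- def _match_label_to_query(label: str, queries: list[str]) -> int:
--     """Single pass: exact normalized match returns immediately; the first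
--     substring match is only recorded and returned if no exact match exists."""
--     label_l = label.lower().strip()
--     sub_idx = None
--     for i, q in enumerate(queries):
--         ql = q.lower().strip()
--         if ql == label_l:
--             return i
--         if sub_idx is None and (label_l in ql or ql in label_l):
--             sub_idx = i
--     return sub_idx if sub_idx is not None else 0
-- ===== Notes on version B (the rewrite author's own statement) =====
-- stated objective: alternative
-- what changed: Replaces A's two full enumerate passes with one pass that normalizes each query once, returns exact matches immediately and records the first substring match for the fallback.
import Mathlib
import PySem

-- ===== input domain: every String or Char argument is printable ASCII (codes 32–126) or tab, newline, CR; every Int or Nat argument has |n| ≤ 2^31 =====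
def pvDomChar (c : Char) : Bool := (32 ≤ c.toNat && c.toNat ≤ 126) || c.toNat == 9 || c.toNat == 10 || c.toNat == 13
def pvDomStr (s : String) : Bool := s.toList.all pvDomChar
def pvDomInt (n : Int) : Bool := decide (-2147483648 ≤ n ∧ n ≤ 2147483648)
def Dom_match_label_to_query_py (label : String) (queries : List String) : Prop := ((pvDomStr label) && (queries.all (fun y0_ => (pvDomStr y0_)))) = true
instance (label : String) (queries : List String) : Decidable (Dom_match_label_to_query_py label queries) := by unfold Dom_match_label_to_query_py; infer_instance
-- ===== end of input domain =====

-- B does A's work in one pass, normalizing each query once and recording the first substring match.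

-- ===== PORT A =====
-- first loop: first i with q.lower().strip() == label_l
def mlqLoop1 (labelL : List Char) (qs : List String) (i : Int) : Option Int :=
  match qs with
  | [] => none
  | q :: rest =>
    if PySem.Chars.strip (PySem.Chars.lower q.toList) = labelL then some i
    else mlqLoop1 labelL rest (i + 1)

-- second loop: first i with label_l in ql or ql in label_l
def mlqLoop2 (labelL : List Char) (qs : List String) (i : Int) : Option Int :=
  match qs with
  | [] => none
  | q :: rest =>
    let ql := PySem.Chars.strip (PySem.Chars.lower q.toList)
    if PySem.Chars.isIn labelL ql || PySem.Chars.isIn ql labelL then some i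
    else mlqLoop2 labelL rest (i + 1)

def match_label_to_query_py (label : String) (queries : List String) : Int :=
  let labelL := PySem.Chars.strip (PySem.Chars.lower label.toList)
  match mlqLoop1 labelL queries 0 with
  | some i => i
  | none =>
    match mlqLoop2 labelL queries 0 with
    | some i => i
    | none => 0

-- ===== PORT B =====
-- single pass: return exact match at once, record first substring match in subIdx
def mlqLoopB (labelL : List Char) (qs : List String) (i : Int) (subIdx : Option Int) : Int :=
  match qs with
  | [] => subIdx.getD 0
  | q :: rest =>
    let ql := PySem.Chars.strip (PySem.Chars.lower q.toList)
    if ql = labelL then i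
    else
      mlqLoopB labelL rest (i + 1)
        (if subIdx.isNone && (PySem.Chars.isIn labelL ql || PySem.Chars.isIn ql labelL)
         then some i else subIdx)

def match_label_to_query_py_alt (label : String) (queries : List String) : Int :=
  let labelL := PySem.Chars.strip (PySem.Chars.lower label.toList)
  mlqLoopB labelL queries 0 none

-- ===== PRECONDITION & SPEC =====
def Spec_match_label_to_query_py (label : String) (queries : List String) (out : Int) : Prop := out = match_label_to_query_py_alt label queries
instance (label : String) (queries : List String) (out : Int) : Decidable (Spec_match_label_to_query_py label queries out) := by unfold Spec_match_label_to_query_py; infer_instance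

-- ===== CLAIM (what is proved, stated in full; the proofs are below) =====
def Claim_equal_match_label_to_query_py : Prop := ∀ (label : String) (queries : List String), Dom_match_label_to_query_py label queries → Spec_match_label_to_query_py label queries (match_label_to_query_py label queries)

-- ===== LEMMAS AND PROOFS =====

theorem mlqLoopB_eq (labelL : List Char) (qs : List String) :
    ∀ (i : Int) (subIdx : Option Int),
      mlqLoopB labelL qs i subIdx =
        match mlqLoop1 labelL qs i with
        | some j => j
        | none => subIdx.getD ((mlqLoop2 labelL qs i).getD 0) := by
  induction qs with
  | nil => intro i subIdx; simp [mlqLoopB, mlqLoop1, mlqLoop2]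
  | cons q rest ih =>
    intro i subIdx
    simp only [mlqLoopB, mlqLoop1, mlqLoop2]
    by_cases hex : PySem.Chars.strip (PySem.Chars.lower q.toList) = labelL
    · simp [hex]
    · simp only [hex, if_false, ih]
      cases h1 : mlqLoop1 labelL rest (i + 1) with
      | some j => simp
      | none =>
        simp only []
        cases subIdx with
        | some s => simp
        | none =>
          by_cases hsub : (PySem.Chars.isIn labelL (PySem.Chars.strip (PySem.Chars.lower q.toList)) ||
              PySem.Chars.isIn (PySem.Chars.strip (PySem.Chars.lower q.toList)) labelL) = true
          · simp [hsub]
          · simp [hsub]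

-- ===== VERDICT (by name: the statement is the Claim_ definition above) =====
theorem match_label_to_query_py_spec : Claim_equal_match_label_to_query_py := by
  intro label queries _
  unfold Spec_match_label_to_query_py match_label_to_query_py match_label_to_query_py_alt
  rw [mlqLoopB_eq]
  cases h1 : mlqLoop1 (PySem.Chars.strip (PySem.Chars.lower label.toList)) queries 0 with
  | some j => simp [h1]
  | none =>
    cases h2 : mlqLoop2 (PySem.Chars.strip (PySem.Chars.lower label.toList)) queries 0 with
    | some j => simp [h1, h2]
    | none => simp [h1, h2]
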